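-- pv_equiv track=rewrite | github.com/provide-io/wrknv | src/wrknv/cli/commands/conform.py | _clean_header_lines
-- ===== SOURCE A (Python) =====
-- def _clean_header_lines(lines: list[str]) -> list[str]:
--     """Remove shebang, SPDX headers, and placeholder docstrings from lines."""
--     cleaned_lines = []
--     skip_next_empty = False
--
--     for line in lines:
--         stripped = line.strip()
--
--         if stripped.startswith("#!"):
--             skip_next_empty = True
--             continue
--
--         if stripped.startswith("# SPDX-") or stripped == "#":
--             skip_next_empty = True
--             continue
--
--         if stripped == '"""TODO: Add module docstring."""':
--             skip_next_empty = True
--             continue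
--
--         if skip_next_empty and stripped == "":
--             skip_next_empty = False
--             continue
--
--         skip_next_empty = False
--         cleaned_lines.append(line)
--
--     return cleaned_lines
-- ===== SOURCE B (Python) =====
-- def _is_header(stripped):
--     return (stripped.startswith("#!")
--             or stripped.startswith("# SPDX-")
--             or stripped == "#"
--             or stripped == '"""TODO: Add module docstring."""')
--
--
-- def _clean_header_lines(lines: list[str]) -> list[str]:
--     """Remove shebang, SPDX headers, and placeholder docstrings from lines."""
--     return [line for prev, line in zip([None] + lines, lines)
--             if not _is_header(line.strip())
--             and not (line.strip() == "" and prev is not None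
--                      and _is_header(prev.strip()))]
-- ===== Notes on version B (the rewrite author's own statement) =====
-- stated objective: simpler
-- what changed: Replaces the stateful loop with a skip_next_empty flag by a stateless comprehension over each line zipped with its predecessor: a line is kept unless it is a header or a blank line whose previous original line is a header.
import Mathlib
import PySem

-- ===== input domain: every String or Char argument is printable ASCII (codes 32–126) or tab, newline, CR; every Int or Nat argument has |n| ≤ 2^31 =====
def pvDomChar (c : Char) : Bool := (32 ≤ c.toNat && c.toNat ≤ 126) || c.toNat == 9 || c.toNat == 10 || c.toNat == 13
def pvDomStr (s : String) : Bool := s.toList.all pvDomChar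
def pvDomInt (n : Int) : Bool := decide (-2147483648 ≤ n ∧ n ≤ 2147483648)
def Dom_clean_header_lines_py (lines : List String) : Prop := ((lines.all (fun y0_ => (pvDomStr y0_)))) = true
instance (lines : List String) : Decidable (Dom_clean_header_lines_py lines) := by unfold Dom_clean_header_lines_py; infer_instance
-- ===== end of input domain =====

-- B replaces A's stateful skip_next_empty loop by a stateless comprehension over
-- each line zipped with its predecessor (objective: simpler).

-- ===== PORT A =====
-- literal transliteration of A's loop: state = (cleaned_lines, skip_next_empty)
def cleanStepA (st : List String × Bool) (line : String) : List String × Bool :=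
  let stripped := PySem.Str.strip line
  if PySem.Str.startswith stripped "#!" then (st.1, true)
  else if PySem.Str.startswith stripped "# SPDX-" || stripped == "#" then (st.1, true)
  else if stripped == "\"\"\"TODO: Add module docstring.\"\"\"" then (st.1, true)
  else if st.2 && stripped == "" then (st.1, false)
  else (st.1 ++ [line], false)

def clean_header_lines_py (lines : List String) : List String :=
  (lines.foldl cleanStepA ([], false)).1

-- ===== PORT B =====
def isHeaderB (stripped : String) : Bool :=
  PySem.Str.startswith stripped "#!"
  || PySem.Str.startswith stripped "# SPDX-"
  || stripped == "#"
  || stripped == "\"\"\"TODO: Add module docstring.\"\"\""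

def keepB (p : Option String × String) : Bool :=
  !(isHeaderB (PySem.Str.strip p.2))
  && !(PySem.Str.strip p.2 == ""
       && (match p.1 with
           | none => false
           | some prev => isHeaderB (PySem.Str.strip prev)))

def clean_header_lines_py_alt (lines : List String) : List String :=
  (((none :: lines.map some).zip lines).filter keepB).map Prod.snd

-- ===== PRECONDITION & SPEC =====
def Spec_clean_header_lines_py (lines : List String) (out : List String) : Prop := out = clean_header_lines_py_alt lines
instance (lines : List String) (out : List String) : Decidable (Spec_clean_header_lines_py lines out) := by unfold Spec_clean_header_lines_py; infer_instance

-- ===== CLAIM (what is proved, stated in full; the proofs are below) =====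
def Claim_equal_clean_header_lines_py : Prop := ∀ (lines : List String), Dom_clean_header_lines_py lines → Spec_clean_header_lines_py lines (clean_header_lines_py lines)

-- ===== LEMMAS AND PROOFS =====

-- the flag A carries is exactly "the previous original line was a header"
def flagOf (p : Option String) : Bool :=
  match p with
  | none => false
  | some s => isHeaderB (PySem.Str.strip s)

-- A's three header tests, taken in order, amount to one isHeaderB test
lemma stepA_char (st : List String × Bool) (x : String) :
    cleanStepA st x =
      if isHeaderB (PySem.Str.strip x) then (st.1, true)
      else if st.2 && (PySem.Str.strip x == "") then (st.1, false)
      else (st.1 ++ [x], false) := by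
  unfold cleanStepA isHeaderB
  dsimp only
  split_ifs <;>
    simp_all [show PySem.Chars.startswith [] ['#', '!'] = false from by decide,
      show PySem.Chars.startswith [] ['#', ' ', 'S', 'P', 'D', 'X', '-'] = false from by decide]

-- A's accumulator only ever grows on the right
lemma foldl_cleanStepA_acc (l : List String) (acc : List String) (b : Bool) :
    (l.foldl cleanStepA (acc, b)).1 = acc ++ (l.foldl cleanStepA ([], b)).1 := by
  induction l generalizing acc b with
  | nil => simp
  | cons x rest ih =>
    rw [List.foldl_cons, List.foldl_cons, stepA_char, stepA_char]
    dsimp only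
    split_ifs with h1 h2
    · exact ih acc true
    · exact ih acc false
    · rw [ih (acc ++ [x])]
      simp only [List.nil_append]
      rw [ih [x]]
      simp
  
lemma main_inv (l : List String) (p : Option String) :
    (l.foldl cleanStepA ([], flagOf p)).1
      = (((p :: l.map some).zip l).filter keepB).map Prod.snd := by
  induction l generalizing p with
  | nil => simp
  | cons x rest ih =>
    rw [List.map_cons, List.zip_cons_cons, List.foldl_cons, stepA_char]
    dsimp only
    by_cases hH : isHeaderB (PySem.Str.strip x) = true
    · rw [if_pos hH]
      have hk : keepB (p, x) = false := by simp [keepB, hH]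
      rw [List.filter_cons, hk]
      simpa [flagOf, hH] using ih (some x)
    · have hH' : isHeaderB (PySem.Str.strip x) = false := by simp_all
      rw [if_neg (by simp [hH'])]
      by_cases hE : (flagOf p && (PySem.Str.strip x == "")) = true
      · rw [if_pos hE]
        have hk : keepB (p, x) = false := by
          simp only [Bool.and_eq_true, beq_iff_eq] at hE
          cases p with
          | none => simp [flagOf] at hE
          | some q =>
            simp only [flagOf] at hE
            simp [keepB, hE.1, hE.2]
        rw [List.filter_cons, hk]
        simpa [flagOf, hH'] using ih (some x)
      · rw [if_neg hE]
        have hk : keepB (p, x) = true := by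
          cases p with
          | none => simp [keepB, hH']
          | some q =>
            simp only [flagOf, Bool.and_eq_true, beq_iff_eq, not_and] at hE
            by_cases hq : isHeaderB (PySem.Str.strip q) = true
            · have hem : ¬ PySem.Str.strip x = "" := fun h => hE hq h
              simp [keepB, hH', hq, hem]
            · simp [keepB, hH', hq]
        rw [List.filter_cons, hk]
        rw [foldl_cleanStepA_acc]
        rw [show rest.foldl cleanStepA ([], false) = rest.foldl cleanStepA ([], flagOf (some x)) by
          simp [flagOf, hH']]
        rw [ih (some x)]
        simp

-- ===== VERDICT (by name: the statement is the Claim_ definition above) =====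
theorem clean_header_lines_py_spec : Claim_equal_clean_header_lines_py := by
  intro lines _
  unfold Spec_clean_header_lines_py clean_header_lines_py clean_header_lines_py_alt
  simpa [flagOf] using main_inv lines none
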